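-- pv_equiv track=rewrite | github.com/pypi-data/pypi-mirror-62 | packages/selkie/selkie-0.21.5-py3-none-any.whl/seal/core/misc.py | _is_unobjectionable
-- ===== SOURCE A (Python) =====
-- def _objectionable_codepoint (x):
--     return (x < 32 or x == 123 or x == 125 or x >= 127)
--
-- def _is_unobjectionable (s):
--     if isinstance(s, str):
--         for c in s:
--             x = ord(c)
--             if _objectionable_codepoint(x): return False
--         return True
--     else:
--         return False
-- ===== SOURCE B (Python) =====
-- import re
--
-- _UNOBJECTIONABLE_RE = re.compile(r'[\x20-\x7a\x7c\x7e]*\Z')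
--
-- def _is_unobjectionable(s):
--     return isinstance(s, str) and _UNOBJECTIONABLE_RE.fullmatch(s) is not None
-- ===== Notes on version B (the rewrite author's own statement) =====
-- stated objective: faster
-- what changed: Replaces the explicit per-character loop with the _objectionable_codepoint predicate by one precompiled regex fullmatch over the character class [\x20-\x7a\x7c\x7e]*, validating the string in a single C-level matching pass.
import Mathlib
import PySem

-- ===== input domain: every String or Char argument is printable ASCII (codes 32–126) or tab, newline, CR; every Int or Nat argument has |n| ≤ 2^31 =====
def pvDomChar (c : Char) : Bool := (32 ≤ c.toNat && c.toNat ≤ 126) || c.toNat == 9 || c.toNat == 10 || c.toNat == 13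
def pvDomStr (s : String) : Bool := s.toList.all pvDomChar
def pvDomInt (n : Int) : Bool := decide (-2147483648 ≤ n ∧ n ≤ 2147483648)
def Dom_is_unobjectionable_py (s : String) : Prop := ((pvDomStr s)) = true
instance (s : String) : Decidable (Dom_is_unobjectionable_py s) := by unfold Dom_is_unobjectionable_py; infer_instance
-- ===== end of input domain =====

-- B replaces A's explicit per-character loop with a single regex fullmatch over the
-- class [\x20-\x7a\x7c\x7e]* (objective: idiomatic); return value only, no side effects.

-- ===== PORT A =====
-- helper _objectionable_codepoint, exact transliteration
def objectionable_codepoint (x : Int) : Bool :=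
  x < 32 || x == 123 || x == 125 || x ≥ 127

-- the 'for c in s' loop with early 'return False'
def isUnobjLoopA : List Char → Bool
  | [] => true
  | c :: rest =>
      if objectionable_codepoint (c.toNat : Int) then false else isUnobjLoopA rest

-- the isinstance(s, str) branch is always the str case here (s : String)
def is_unobjectionable_py (s : String) : Bool := isUnobjLoopA s.toList

-- ===== PORT B =====
-- regex fullmatch of [\x20-\x7a\x7c\x7e]* = every character lies in that class
def inRegexClassB (c : Char) : Bool :=
  (32 ≤ c.toNat && c.toNat ≤ 122) || c.toNat == 124 || c.toNat == 126

def is_unobjectionable_py_alt (s : String) : Bool := s.toList.all inRegexClassB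

-- ===== PRECONDITION & SPEC =====
def Spec_is_unobjectionable_py (s : String) (out : Bool) : Prop := out = is_unobjectionable_py_alt s
instance (s : String) (out : Bool) : Decidable (Spec_is_unobjectionable_py s out) := by unfold Spec_is_unobjectionable_py; infer_instance

-- ===== CLAIM (what is proved, stated in full; the proofs are below) =====
def Claim_equal_is_unobjectionable_py : Prop := ∀ (s : String), Dom_is_unobjectionable_py s → Spec_is_unobjectionable_py s (is_unobjectionable_py s)

-- ===== LEMMAS AND PROOFS =====
theorem notObj_eq_class (c : Char) :
    (!objectionable_codepoint ((c.toNat : Int))) = inRegexClassB c := by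
  unfold objectionable_codepoint inRegexClassB
  rw [Bool.eq_iff_iff]
  simp only [Bool.not_eq_eq_eq_not, Bool.not_true, Bool.or_eq_false_iff, Bool.or_eq_true,
    Bool.and_eq_true, decide_eq_true_eq, decide_eq_false_iff_not, beq_iff_eq,
    beq_eq_false_iff_ne, ge_iff_le, not_le, not_lt, ne_eq]
  omega

theorem loopA_eq_all (l : List Char) : isUnobjLoopA l = l.all inRegexClassB := by
  induction l with
  | nil => rfl
  | cons c rest ih =>
      simp only [isUnobjLoopA, List.all_cons, ih, ← notObj_eq_class c]
      cases objectionable_codepoint ((c.toNat : Int)) <;> simp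

-- ===== VERDICT (by name: the statement is the Claim_ definition above) =====
theorem is_unobjectionable_py_spec : Claim_equal_is_unobjectionable_py := by
  intro s _
  unfold Spec_is_unobjectionable_py is_unobjectionable_py is_unobjectionable_py_alt
  exact loopA_eq_all s.toList
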